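-- pv_equiv track=rewrite | github.com/berkyenikoylu/Berks-Screenshot-Tool | detector.py | clean_app_name
-- ===== SOURCE A (Python) =====
-- def clean_app_name(process_name: str, window_title: str) -> str:
--     """İşlem adından temiz bir uygulama adı oluştur."""
--     # .exe uzantısını kaldır
--     name = process_name.replace(".exe", "").replace(".EXE", "")
--
--     # Bilinen sistem işlemleri için pencere başlığını kullan
--     system_processes = ["explorer", "ApplicationFrameHost", "TextInputHost"]
--     if name in system_processes and window_title:
--         # Pencere başlığından ilk anlamlı kısmı al
--         name = window_title.split(" - ")[0].split(" | ")[0]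
--
--     # Özel karakterleri temizle (dosya adı için)
--     invalid_chars = '<>:"/\\|?*'
--     for char in invalid_chars:
--         name = name.replace(char, "")
--
--     # Boşlukları ve fazla karakterleri düzelt
--     name = name.strip()
--     if not name:
--         name = "Screen"
--
--     return name
-- ===== SOURCE B (Python) =====
-- _SYSTEM = ("explorer", "ApplicationFrameHost", "TextInputHost")
-- _INVALID = '<>:"/\\|?*'
--
--
-- def _drop_all(s, pat):
--     """Remove every occurrence of pat from s in one left-to-right scan."""
--     out = []
--     i = 0
--     while i < len(s):
--         if s.startswith(pat, i):
--             i += len(pat)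
--         else:
--             out.append(s[i])
--             i += 1
--     return ''.join(out)
--
--
-- def _before(s, sep):
--     """The part of s before the first occurrence of sep (all of s if absent)."""
--     i = s.find(sep)
--     return s if i < 0 else s[:i]
--
--
-- def clean_app_name(process_name: str, window_title: str) -> str:
--     """Create a clean app name from the process name."""
--     name = _drop_all(_drop_all(process_name, ".exe"), ".EXE")
--
--     if name in _SYSTEM and window_title:
--         name = _before(_before(window_title, " - "), " | ")
--
--     kept = [c for c in name if c not in _INVALID]
--
--     # trim whitespace from both ends
--     while kept and kept[0].isspace():
--         kept.pop(0)
--     while kept and kept[-1].isspace():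
--         kept.pop()
--
--     return ''.join(kept) if kept else "Screen"
-- ===== Notes on version B (the rewrite author's own statement) =====
-- stated objective: alternative
-- what changed: B rebuilds the pipeline at the character level: one left-to-right scanner removes '.exe'/'.EXE' occurrences instead of str.replace, find+slice cuts the window title instead of the split-chain indexing, a single filtering pass drops the invalid characters instead of nine repeated replace scans, and pop-loops trim whitespace instead of strip().
import Mathlib
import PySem

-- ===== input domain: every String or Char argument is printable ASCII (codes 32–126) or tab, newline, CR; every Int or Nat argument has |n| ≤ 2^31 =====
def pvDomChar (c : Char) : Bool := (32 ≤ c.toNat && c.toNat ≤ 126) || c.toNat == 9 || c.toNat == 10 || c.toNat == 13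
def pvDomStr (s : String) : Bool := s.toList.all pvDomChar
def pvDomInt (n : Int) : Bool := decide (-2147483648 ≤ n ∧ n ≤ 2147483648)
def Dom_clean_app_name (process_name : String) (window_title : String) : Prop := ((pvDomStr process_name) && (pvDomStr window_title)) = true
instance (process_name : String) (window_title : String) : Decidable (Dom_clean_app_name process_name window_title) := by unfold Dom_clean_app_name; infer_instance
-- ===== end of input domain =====

-- B rebuilds the whole pipeline at the character level: one left-to-right scanner removes the
-- ".exe"/".EXE" occurrences, find+slice cuts the window title, one filtering pass drops the
-- invalid characters, and pop-loops trim the ends (objective: alternative decomposition).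

-- ===== PORT A =====
def clean_app_name (process_name : String) (window_title : String) : String :=
  let name := PySem.Str.replace (PySem.Str.replace process_name ".exe" "") ".EXE" ""
  let system_processes : List String := ["explorer", "ApplicationFrameHost", "TextInputHost"]
  let name :=
    if system_processes.contains name && !(window_title == "") then
      (((PySem.Str.split? (((PySem.Str.split? window_title " - ").getD []).headD "") " | ").getD []).headD "")
    else name
  let invalid_chars := "<>:\"/\\|?*"
  let name := invalid_chars.toList.foldl (fun n c => PySem.Str.replace n (String.ofList [c]) "") name
  let name := PySem.Str.strip name
  if name == "" then "Screen" else name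

-- ===== PORT B =====
-- B's _drop_all: one left-to-right scan removing every occurrence of the (nonempty) pattern p :: ps.
def pvDropAll (p : Char) (ps : List Char) (s : List Char) : List Char :=
  match s with
  | [] => []
  | c :: rest =>
    if (p :: ps).isPrefixOf (c :: rest) then pvDropAll p ps (rest.drop ps.length)
    else c :: pvDropAll p ps rest
termination_by s.length
decreasing_by
  all_goals simp only [List.length_drop, List.length_cons]; omega

-- B's _before: s.find(sep), then the slice s[:i] (i ≥ 0, so the slice is List.take — exact).
def pvBefore (s sep : List Char) : List Char :=
  let i := PySem.Chars.find s sep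
  if i < 0 then s else s.take i.toNat

def clean_app_name_alt (process_name : String) (window_title : String) : String :=
  let name := pvDropAll '.' "EXE".toList (pvDropAll '.' "exe".toList process_name.toList)
  let name :=
    if (name == "explorer".toList || name == "ApplicationFrameHost".toList
          || name == "TextInputHost".toList) && !(window_title.toList == []) then
      pvBefore (pvBefore window_title.toList " - ".toList) " | ".toList
    else name
  let kept := name.filter (fun c => !("<>:\"/\\|?*".toList.contains c))
  -- the two pop-loops = dropWhile at the front, then dropWhile on the reverse
  let kept := ((kept.dropWhile PySem.Chars.isspace).reverse.dropWhile PySem.Chars.isspace).reverse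
  if kept.isEmpty then "Screen" else String.ofList kept

-- ===== PRECONDITION & SPEC =====
def Spec_clean_app_name (process_name : String) (window_title : String) (out : String) : Prop := out = clean_app_name_alt process_name window_title
instance (process_name : String) (window_title : String) (out : String) : Decidable (Spec_clean_app_name process_name window_title out) := by unfold Spec_clean_app_name; infer_instance

-- ===== CLAIM (what is proved, stated in full; the proofs are below) =====
def Claim_equal_clean_app_name : Prop := ∀ (process_name : String) (window_title : String), Dom_clean_app_name process_name window_title → Spec_clean_app_name process_name window_title (clean_app_name process_name window_title)

-- ===== LEMMAS AND PROOFS =====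

-- A's str.replace with empty replacement is B's one-pass scanner
theorem replace_go_dropAll (p : Char) (ps : List Char) (l acc : List Char) (fuel : Nat)
    (h : l.length ≤ fuel) :
    PySem.Chars.replace.go (p :: ps) [] fuel l acc = acc.reverse ++ pvDropAll p ps l := by
  induction fuel generalizing l acc with
  | zero =>
    have : l = [] := by cases l <;> simp_all
    subst this
    simp [PySem.Chars.replace.go, pvDropAll]
  | succ fuel ih =>
    cases l with
    | nil => simp [PySem.Chars.replace.go, pvDropAll]
    | cons c t =>
      by_cases hx : (p :: ps).isPrefixOf (c :: t)
      · have hd : (t.drop ps.length).length ≤ fuel := by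
          have := List.length_drop (l := t) (i := ps.length)
          have := Nat.le_of_succ_le_succ h
          omega
        simp [PySem.Chars.replace.go, hx, pvDropAll, ih _ _ hd]
      · have ht : t.length ≤ fuel := by simpa using Nat.le_of_succ_le_succ h
        simp [PySem.Chars.replace.go, hx, pvDropAll, ih _ _ ht]

theorem replace_eq_dropAll (p : Char) (ps : List Char) (l : List Char) :
    PySem.Chars.replace l (p :: ps) [] = pvDropAll p ps l := by
  rw [PySem.Chars.replace]
  simp [replace_go_dropAll p ps l [] l.length (le_refl _)]

-- the first piece of split, characterised structurally
def pbAux (sep : List Char) : List Char → List Char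
  | [] => []
  | c :: rest => if sep.isPrefixOf (c :: rest) then [] else c :: pbAux sep rest

theorem splitOn_go_head_acc (sep : List Char) (fuel : Nat) (l cur : List Char)
    (acc : List (List Char)) (a : List Char) :
    (PySem.Chars.splitOn.go sep fuel l cur (acc ++ [a])).head?.getD [] = a := by
  induction fuel generalizing l cur acc with
  | zero =>
    rw [show PySem.Chars.splitOn.go sep 0 l cur (acc ++ [a])
        = ((cur.reverse ++ l) :: ((acc ++ [a]))).reverse from rfl]
    rw [show (cur.reverse ++ l) :: (acc ++ [a]) = ((cur.reverse ++ l) :: acc) ++ [a] from rfl]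
    simp
  | succ fuel ih =>
    cases l with
    | nil =>
      rw [show PySem.Chars.splitOn.go sep (fuel + 1) [] cur (acc ++ [a])
          = (cur.reverse :: (acc ++ [a])).reverse from rfl]
      rw [show cur.reverse :: (acc ++ [a]) = (cur.reverse :: acc) ++ [a] from rfl]
      simp
    | cons c rest =>
      by_cases hx : sep.isPrefixOf (c :: rest)
      · have := ih (List.drop sep.length (c :: rest)) [] (cur.reverse :: acc)
        simpa [PySem.Chars.splitOn.go, hx] using this
      · simpa [PySem.Chars.splitOn.go, hx] using ih rest (c :: cur) acc

theorem splitOn_go_head (sep : List Char) (fuel : Nat) (l cur : List Char)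
    (h : l.length ≤ fuel) :
    (PySem.Chars.splitOn.go sep fuel l cur []).head?.getD [] = cur.reverse ++ pbAux sep l := by
  induction fuel generalizing l cur with
  | zero =>
    have : l = [] := by cases l <;> simp_all
    subst this
    simp [PySem.Chars.splitOn.go, pbAux]
  | succ fuel ih =>
    cases l with
    | nil => simp [PySem.Chars.splitOn.go, pbAux]
    | cons c rest =>
      by_cases hx : sep.isPrefixOf (c :: rest)
      · have := splitOn_go_head_acc sep fuel (List.drop sep.length (c :: rest)) [] [] cur.reverse
        simpa [PySem.Chars.splitOn.go, hx, pbAux] using this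
      · have ht : rest.length ≤ fuel := by simpa using Nat.le_of_succ_le_succ h
        have := ih rest (c :: cur) ht
        simpa [PySem.Chars.splitOn.go, hx, pbAux] using this

theorem splitOn_head (s sep : List Char) :
    (PySem.Chars.splitOn s sep).head?.getD [] = pbAux sep s := by
  rw [PySem.Chars.splitOn]
  simpa using splitOn_go_head sep (s.length + 1) s [] (by omega)

-- find.go never answers below its counter (except -1)
theorem find_go_lb (sep l : List Char) (k : Nat) :
    PySem.Chars.find.go sep l k = -1 ∨ (k : Int) ≤ PySem.Chars.find.go sep l k := by
  induction l generalizing k with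
  | nil =>
    by_cases he : sep.isEmpty <;> simp [PySem.Chars.find.go, he]
  | cons c rest ih =>
    by_cases hx : sep.isPrefixOf (c :: rest)
    · simp [PySem.Chars.find.go, hx]
    · rcases ih (k + 1) with h | h <;> simp [PySem.Chars.find.go, hx]
      · left; exact h
      · right; omega

theorem pbAux_eq_find_go (sep : List Char) (hsep : sep ≠ []) (l : List Char) (k : Nat) :
    pbAux sep l =
      if PySem.Chars.find.go sep l k < 0 then l
      else l.take (PySem.Chars.find.go sep l k - k).toNat := by
  induction l generalizing k with
  | nil =>
    have he : sep.isEmpty = false := by cases sep <;> simp_all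
    simp [pbAux, PySem.Chars.find.go, he]
  | cons c rest ih =>
    by_cases hx : sep.isPrefixOf (c :: rest)
    · have hgo : PySem.Chars.find.go sep (c :: rest) k = (k : Int) := by
        rw [PySem.Chars.find.go]; simp [hx]
      simp [pbAux, hx, hgo]
    · have hx' : sep.isPrefixOf (c :: rest) = false := by
        revert hx; cases sep.isPrefixOf (c :: rest) <;> simp
      have hgo : PySem.Chars.find.go sep (c :: rest) k
          = PySem.Chars.find.go sep rest (k + 1) := by
        rw [PySem.Chars.find.go]; simp [hx']
      rw [pbAux, if_neg hx, hgo]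
      rcases find_go_lb sep rest (k + 1) with h | h
      · simp [h, ih (k + 1)]
      · have hg : ¬ PySem.Chars.find.go sep rest (k + 1) < 0 := by omega
        rw [if_neg (by omega : ¬ PySem.Chars.find.go sep rest (k + 1) < 0)]
        rw [ih (k + 1), if_neg hg]
        have h1 : (PySem.Chars.find.go sep rest (k + 1) - k).toNat
            = (PySem.Chars.find.go sep rest (k + 1) - (k + 1)).toNat + 1 := by omega
        simp [h1]

theorem pbAux_eq_pvBefore (s sep : List Char) (hsep : sep ≠ []) :
    pbAux sep s = pvBefore s sep := by
  rw [pvBefore]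
  simpa [PySem.Chars.find] using pbAux_eq_find_go sep hsep s 0

-- String-level: the first piece of A's split chain is B's find+slice prefix
theorem split_head_toList (s sep : String) (hsep : sep.toList ≠ []) :
    ((((PySem.Str.split? s sep).getD []).headD "")).toList = pvBefore s.toList sep.toList := by
  have he : sep.toList.isEmpty = false := by cases h : sep.toList <;> simp_all
  rw [PySem.Str.split?]
  rw [PySem.Chars.split?, he]
  simp only [Bool.false_eq_true, if_false, Option.map_some, Option.getD_some]
  rw [← pbAux_eq_pvBefore s.toList sep.toList hsep, ← splitOn_head]
  cases h : PySem.Chars.splitOn s.toList sep.toList with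
  | nil => simp
  | cons x xs => simp

-- membership in a three-element String list, as A's contains computes it
theorem contains_three (a x y z : String) :
    [x, y, z].contains a = ((a == x || a == y) || a == z) := by
  cases hx : a == x <;> cases hy : a == y <;> cases hz : a == z <;>
    simp only [List.contains_cons, List.contains_nil, hx, hy, hz, Bool.false_or,
      Bool.or_false, Bool.or_true]

-- Bool bridge for the final emptiness test
theorem list_beq_nil (l : List Char) : (l == []) = l.isEmpty := by
  cases l <;> rfl

-- A's loop of single-character replaces is B's one filtering pass
theorem replace_go_single (c : Char) (l acc : List Char) (fuel : Nat) (h : l.length ≤ fuel) :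
    PySem.Chars.replace.go [c] [] fuel l acc
      = acc.reverse ++ l.filter (fun x => !(x == c)) := by
  induction l generalizing fuel acc with
  | nil => cases fuel <;> simp [PySem.Chars.replace.go]
  | cons x t ih =>
    cases fuel with
    | zero => simp at h
    | succ fuel =>
      have ht : t.length ≤ fuel := by simpa using Nat.le_of_succ_le_succ h
      by_cases hx : x = c
      · subst hx
        simp [PySem.Chars.replace.go, List.isPrefixOf, ih _ fuel ht]
      · have hx1 : (c == x) = false := by simp; exact fun h' => hx h'.symm
        have hx2 : (x == c) = false := by simpa using hx
        simp [PySem.Chars.replace.go, List.isPrefixOf, hx1, hx2, ih _ fuel ht]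

theorem replace_single (c : Char) (s : List Char) :
    PySem.Chars.replace s [c] [] = s.filter (fun x => !(x == c)) := by
  rw [PySem.Chars.replace]
  simp [replace_go_single c s [] s.length (le_refl _)]

theorem foldl_replace_eq_filter (cs : List Char) (name : String) :
    cs.foldl (fun n c => PySem.Str.replace n (String.ofList [c]) "") name
      = String.ofList (name.toList.filter (fun x => !(cs.contains x))) := by
  induction cs generalizing name with
  | nil => simp
  | cons c cs ih =>
    rw [List.foldl_cons, ih]
    congr 1
    rw [PySem.Str.toList_replace]
    simp only [String.toList_ofList, String.toList_empty]
    rw [replace_single]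
    rw [List.filter_filter]
    apply List.filter_congr
    intro x _
    by_cases hx : x = c
    · subst hx; simp
    · simp [hx]

-- the String-level membership/emptiness tests of A match B's List-level ones
theorem beq_toList (s t : String) : (s == t) = (s.toList == t.toList) := by
  by_cases h : s = t
  · simp [h]
  · have : s.toList ≠ t.toList := fun hl => h (String.toList_inj.mp hl)
    simp [h, this]

-- ===== VERDICT (by name: the statement is the Claim_ definition above) =====
theorem clean_app_name_spec : Claim_equal_clean_app_name := by
  intro process_name window_title _
  unfold Spec_clean_app_name
  simp only [clean_app_name, clean_app_name_alt]
  -- stage 1: the ".exe"/".EXE" removal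
  have h1 : (PySem.Str.replace (PySem.Str.replace process_name ".exe" "") ".EXE" "").toList
      = pvDropAll '.' "EXE".toList (pvDropAll '.' "exe".toList process_name.toList) := by
    rw [PySem.Str.toList_replace, PySem.Str.toList_replace]
    rw [show (".exe" : String).toList = '.' :: "exe".toList from rfl]
    rw [show (".EXE" : String).toList = '.' :: "EXE".toList from rfl]
    simp only [String.toList_empty, replace_eq_dropAll]
  set nameA := PySem.Str.replace (PySem.Str.replace process_name ".exe" "") ".EXE" "" with hnA
  set nameB := pvDropAll '.' "EXE".toList (pvDropAll '.' "exe".toList process_name.toList) with hnB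
  -- stage 2: the branch conditions coincide, and so do the branch results
  have hcond : (["explorer", "ApplicationFrameHost", "TextInputHost"].contains nameA
        && !(window_title == ""))
      = ((nameB == "explorer".toList || nameB == "ApplicationFrameHost".toList
            || nameB == "TextInputHost".toList) && !(window_title.toList == [])) := by
    have h2 : (window_title == "") = (window_title.toList == []) := by
      simpa using beq_toList window_title ""
    rw [contains_three, h2]
    rw [beq_toList nameA "explorer", beq_toList nameA "ApplicationFrameHost",
        beq_toList nameA "TextInputHost", h1]
  have hmid : (if ["explorer", "ApplicationFrameHost", "TextInputHost"].contains nameA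
        && !(window_title == "") then
        (((PySem.Str.split? (((PySem.Str.split? window_title " - ").getD []).headD "") " | ").getD
            []).headD "")
      else nameA).toList
      = (if (nameB == "explorer".toList || nameB == "ApplicationFrameHost".toList
            || nameB == "TextInputHost".toList) && !(window_title.toList == []) then
          pvBefore (pvBefore window_title.toList " - ".toList) " | ".toList
        else nameB) := by
    rw [← hcond]
    by_cases hc : (["explorer", "ApplicationFrameHost", "TextInputHost"].contains nameA
        && !(window_title == "")) = true
    · rw [if_pos hc, if_pos hc]
      rw [split_head_toList _ " | " (by decide)]
      rw [split_head_toList _ " - " (by decide)]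
    · rw [if_neg hc, if_neg hc, h1]
  set midA := (if ["explorer", "ApplicationFrameHost", "TextInputHost"].contains nameA
        && !(window_title == "") then
        (((PySem.Str.split? (((PySem.Str.split? window_title " - ").getD []).headD "") " | ").getD
            []).headD "")
      else nameA) with hmA
  set midB := (if (nameB == "explorer".toList || nameB == "ApplicationFrameHost".toList
            || nameB == "TextInputHost".toList) && !(window_title.toList == []) then
          pvBefore (pvBefore window_title.toList " - ".toList) " | ".toList
        else nameB) with hmB
  -- stage 3: invalid-character removal and strip
  have h3 : (PySem.Str.strip ("<>:\"/\\|?*".toList.foldl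
        (fun n c => PySem.Str.replace n (String.ofList [c]) "") midA)).toList
      = (((midB.filter (fun c => !("<>:\"/\\|?*".toList.contains c))).dropWhile
          PySem.Chars.isspace).reverse.dropWhile PySem.Chars.isspace).reverse := by
    rw [foldl_replace_eq_filter]
    rw [PySem.Str.toList_strip]
    rw [PySem.Chars.strip, PySem.Chars.lstrip, PySem.Chars.rstrip]
    simp only [String.toList_ofList, hmid]
  set finA := PySem.Str.strip ("<>:\"/\\|?*".toList.foldl
        (fun n c => PySem.Str.replace n (String.ofList [c]) "") midA) with hfA
  set finB := (((midB.filter (fun c => !("<>:\"/\\|?*".toList.contains c))).dropWhile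
          PySem.Chars.isspace).reverse.dropWhile PySem.Chars.isspace).reverse with hfB
  -- stage 4: the default
  have hemp : (finA == "") = finB.isEmpty := by
    rw [beq_toList finA "", h3]
    rw [show ("" : String).toList = [] from rfl]
    exact list_beq_nil finB
  rw [hemp]
  by_cases he : finB.isEmpty = true
  · rw [if_pos he, if_pos he]
  · rw [if_neg he, if_neg he]
    rw [← h3, String.ofList_toList]
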